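-- pv_equiv track=rewrite | github.com/tyut-jiaqiwei/Observation-Simulator | test2.py | cha
-- ===== SOURCE A (Python) =====
-- def cha(key,kkk,dict):
--     value = dict[kkk]
--     for v in value:
--         if str(v) == key:
--             return 0
--         elif str(v) in dict.keys():
--             return cha(key,str(v),dict)
--         elif str(v) not in dict.keys():
--             pass
--     return 1
-- ===== SOURCE B (Python) =====
-- def cha(key, kkk, dict):
--     def step(cur):
--         # classify the first relevant entry of dict[cur]
--         for v in dict[cur]:
--             s = str(v)
--             if s == key:
--                 return ('hit', None)
--             if s in dict:
--                 return ('next', s)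
--         return ('dead', None)
--
--     cur = kkk
--     while True:
--         tag, nxt = step(cur)
--         if tag == 'hit':
--             return 0
--         if tag == 'dead':
--             return 1
--         cur = nxt
-- ===== Notes on version B (the rewrite author's own statement) =====
-- stated objective: alternative
-- what changed: The self-recursive scan is replaced by an explicit while loop over a current key driven by a separate step classifier ('hit'/'next'/'dead') for one dict entry.
import Mathlib
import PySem

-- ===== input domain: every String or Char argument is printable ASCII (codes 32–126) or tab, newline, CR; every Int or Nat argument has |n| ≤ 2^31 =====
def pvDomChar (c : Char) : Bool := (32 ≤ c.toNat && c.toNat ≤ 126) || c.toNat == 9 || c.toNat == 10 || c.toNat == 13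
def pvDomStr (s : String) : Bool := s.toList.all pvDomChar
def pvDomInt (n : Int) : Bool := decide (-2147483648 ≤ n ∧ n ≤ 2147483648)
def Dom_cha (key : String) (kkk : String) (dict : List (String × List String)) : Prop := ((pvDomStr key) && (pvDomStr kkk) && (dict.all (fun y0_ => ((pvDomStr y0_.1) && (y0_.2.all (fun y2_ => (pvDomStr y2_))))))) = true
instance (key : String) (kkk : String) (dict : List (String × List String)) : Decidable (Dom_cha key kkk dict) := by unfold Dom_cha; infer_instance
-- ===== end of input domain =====

-- B changes the decomposition only (recursion -> explicit loop with a step classifier); equivalence on Pre_, same cost.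

-- ===== PORT A =====
-- dict[k] (first match, as in a Python dict given as an association list)
def chaLookup (dict : List (String × List String)) (k : String) : Option (List String) :=
  (dict.find? (fun p => p.1 == k)).map (·.2)

-- str(v) in dict.keys()
def chaIsKey (dict : List (String × List String)) (v : String) : Bool :=
  (dict.map (·.1)).contains v

mutual
  -- the body of cha: one fuel unit per recursive call; fuel 0 / missing key return 1,
  -- both unreachable under Pre_cha (there kkk is a key, the key graph reachable from kkk
  -- is acyclic, and every recursion step stays on keys).
  def chaFuel (fuel : Nat) (key : String) (kkk : String) (dict : List (String × List String)) : Int :=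
    match fuel with
    | 0 => 1
    | fuel + 1 =>
      match chaLookup dict kkk with
      | none => 1
      | some value => chaGo fuel key dict value

  -- the 'for v in value' loop of A
  def chaGo (fuel : Nat) (key : String) (dict : List (String × List String)) : List String → Int
    | [] => 1
    | v :: vs =>
      if v == key then 0
      else if chaIsKey dict v then chaFuel fuel key v dict
      else chaGo fuel key dict vs
end

def cha (key : String) (kkk : String) (dict : List (String × List String)) : Int :=
  chaFuel (dict.length + 1) key kkk dict

-- ===== PORT B =====
inductive ChaStep where
  | hit : ChaStep
  | next : String → ChaStep
  | dead : ChaStep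
deriving DecidableEq, Repr

-- B's step classifier for one dict entry
def chaStep (key : String) (dict : List (String × List String)) : List String → ChaStep
  | [] => .dead
  | v :: vs =>
    if v == key then .hit
    else if ((dict.find? (fun p => p.1 == v)).isSome) then .next v
    else chaStep key dict vs

-- B's own dict[cur] lookup
def chaGetB (dict : List (String × List String)) (cur : String) : Option (List String) :=
  match dict with
  | [] => none
  | p :: rest => if p.1 == cur then some p.2 else chaGetB rest cur

-- B's while loop: one fuel unit per iteration; defaults as in chaFuel, unreachable under Pre_cha
def chaLoop (fuel : Nat) (key : String) (cur : String) (dict : List (String × List String)) : Int :=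
  match fuel with
  | 0 => 1
  | fuel + 1 =>
    match chaGetB dict cur with
    | none => 1
    | some value =>
      match chaStep key dict value with
      | .hit => 0
      | .dead => 1
      | .next s => chaLoop fuel key s dict

def cha_alt (key : String) (kkk : String) (dict : List (String × List String)) : Int :=
  chaLoop (dict.length + 1) key kkk dict

-- ===== PRECONDITION & SPEC =====
-- helpers for Pre_cha: the deterministic key-successor relation A follows.
-- chaFirstChild gives the first entry of a value list that matters: none if the scan hits
-- the searched key or runs out (A stops), some v for the first entry that is itself a dict key
-- (A moves to that key).
def chaFirstChild (key : String) (dict : List (String × List String)) : List String → Option String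
  | [] => none
  | v :: vs =>
    if v = key then none
    else if (dict.map (·.1)).contains v then some v
    else chaFirstChild key dict vs

-- the chain of keys A visits, truncated at n extra steps (n = dict.length + 1 suffices:
-- a longer chain necessarily repeats a key)
def chaChain (key : String) (dict : List (String × List String)) : Nat → String → List String
  | 0, k => [k]
  | n + 1, k =>
    k :: (match (chaLookup dict k).bind (chaFirstChild key dict) with
          | none => []
          | some s => chaChain key dict n s)

-- Pre_cha excludes exactly the inputs on which Python A does not return normally:
-- kkk not a key (KeyError), or the key-successor chain revisits a key (A recurses forever).
def Pre_cha (key : String) (kkk : String) (dict : List (String × List String)) : Prop :=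
  (chaLookup dict kkk).isSome = true ∧
  (chaChain key dict (dict.length + 1) kkk).Nodup

instance (key : String) (kkk : String) (dict : List (String × List String)) : Decidable (Pre_cha key kkk dict) := by unfold Pre_cha; infer_instance

def pvWitness_cha : String × String × (List (String × List String)) :=
  ("x", "a", [("a", ["q", "b"]), ("b", ["x"])])

def Spec_cha (key : String) (kkk : String) (dict : List (String × List String)) (out : Int) : Prop := out = cha_alt key kkk dict
instance (key : String) (kkk : String) (dict : List (String × List String)) (out : Int) : Decidable (Spec_cha key kkk dict out) := by unfold Spec_cha; infer_instance

-- ===== CLAIM (what is proved, stated in full; the proofs are below) =====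
def Claim_equal_cha : Prop := ∀ (key : String) (kkk : String) (dict : List (String × List String)), Dom_cha key kkk dict → Pre_cha key kkk dict → Spec_cha key kkk dict (cha key kkk dict)

-- ===== LEMMAS AND PROOFS =====
-- the two ports' key-membership tests agree
theorem chaIsKey_eq_find (dict : List (String × List String)) (v : String) :
    chaIsKey dict v = (dict.find? (fun p => p.1 == v)).isSome := by
  induction dict with
  | nil => rfl
  | cons p rest ih =>
    simp only [chaIsKey, List.map_cons, List.contains_cons, List.find?_cons] at *
    rw [show (p.1 == v) = (v == p.1) from by simp [eq_comm]]
    cases hv : (v == p.1) with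
    | true => simp
    | false => rw [← ih]; simp

-- A's inner loop computes what B's step classifier decides
theorem chaGo_eq_step (fuel : Nat) (key : String) (dict : List (String × List String)) (vs : List String) :
    chaGo fuel key dict vs =
      match chaStep key dict vs with
      | .hit => 0
      | .dead => 1
      | .next s => chaFuel fuel key s dict := by
  induction vs with
  | nil => simp [chaGo, chaStep]
  | cons v vs ih =>
    simp only [chaGo, chaStep, chaIsKey_eq_find]
    by_cases hk : v == key
    · simp only [hk, if_true]
    · simp only [hk, Bool.false_eq_true, if_false]
      by_cases hm : ((dict.find? (fun p => p.1 == v)).isSome)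
      · simp only [hm, if_true]
      · simp only [hm, Bool.false_eq_true, if_false, ih]

-- the two lookups agree
theorem chaGetB_eq_lookup (dict : List (String × List String)) (k : String) :
    chaGetB dict k = chaLookup dict k := by
  induction dict with
  | nil => rfl
  | cons p rest ih =>
    simp only [chaGetB, chaLookup, List.find?_cons]
    by_cases h : p.1 == k
    · simp [h]
    · rw [ih, chaLookup]; simp [h]

theorem chaFuel_eq_chaLoop (fuel : Nat) (key : String) (dict : List (String × List String)) :
    ∀ kkk, chaFuel fuel key kkk dict = chaLoop fuel key kkk dict := by
  induction fuel with
  | zero => intro kkk; simp [chaFuel, chaLoop]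
  | succ n ih =>
    intro kkk
    cases h : chaLookup dict kkk with
    | none => simp only [chaFuel, chaLoop, h, chaGetB_eq_lookup]
    | some value =>
      simp only [chaFuel, chaLoop, h, chaGetB_eq_lookup, chaGo_eq_step]
      cases chaStep key dict value with
      | hit => rfl
      | dead => rfl
      | next s => exact ih s

-- ===== VERDICT (by name: the statement is the Claim_ definition above) =====
theorem cha_spec : Claim_equal_cha := by
  intro key kkk dict _ _
  unfold Spec_cha cha cha_alt
  exact chaFuel_eq_chaLoop _ key dict kkk
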